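-- pv_equiv track=rewrite | github.com/xuexutao/bishi | 第一题.py | solve
-- ===== SOURCE A (Python) =====
-- def solve(source, target):
--     # n 行 m 列
--     n = len(source)
--     m = len(target)
--     s = set()
--     for x in source:
--         s.add(x)
--
--     for x in target:
--         if x not in s:
--             return -1;
--
--     dp = [[0] * m for _ in range(n)]
--     for i in range(n):
--         for j in range(m):
--             if (source[i] == target[j]):
--                 dp[i][j] = 1
--
--     l = []
--     for j in range(m):
--         for i in range(n):
--             if dp[i][j] == 1:
--                 l.append(i);
--                 break
--     ans = 0
--     for i in range(1, len(l)):
--         if l[i] > l[i - 1]: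
--             continue
--         ans += 1
--     return ans + 1
-- ===== SOURCE B (Python) =====
-- def solve(source, target):
--     first = {}
--     for i, x in enumerate(source):
--         if x not in first:
--             first[x] = i
--     ans = 1
--     prev = None
--     for x in target:
--         if x not in first:
--             return -1
--         idx = first[x]
--         if prev is not None and idx <= prev:
--             ans += 1
--         prev = idx
--     return ans
-- ===== Notes on version B (the rewrite author's own statement) =====
-- stated objective: faster
-- what changed: Replaced the n*m dp matrix plus per-column scans with a single dict mapping each value to its first index in source, then one pass over target threading the previous index.
import Mathlib
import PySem

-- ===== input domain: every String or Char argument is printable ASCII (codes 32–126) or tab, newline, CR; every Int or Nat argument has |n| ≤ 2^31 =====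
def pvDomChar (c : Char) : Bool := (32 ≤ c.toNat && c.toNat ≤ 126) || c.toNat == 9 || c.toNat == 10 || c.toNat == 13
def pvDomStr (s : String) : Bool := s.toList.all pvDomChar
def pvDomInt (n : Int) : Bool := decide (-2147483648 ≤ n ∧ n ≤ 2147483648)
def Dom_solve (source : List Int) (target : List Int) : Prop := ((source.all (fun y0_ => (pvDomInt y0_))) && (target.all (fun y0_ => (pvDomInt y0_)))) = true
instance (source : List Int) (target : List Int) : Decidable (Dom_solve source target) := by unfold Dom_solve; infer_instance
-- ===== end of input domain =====

-- B replaces A's n×m dp matrix and per-column scans by a value→first-index dict and one pass over target (objective: faster).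

-- ===== PORT A =====
-- 'for x in target: if x not in s: return -1' (early return -1 ↦ false)
def solveCheck (s : PySem.Set Int) : List Int → Bool
  | [] => true
  | x :: xs => if PySem.Set.contains s x then solveCheck s xs else false

def solve (source : List Int) (target : List Int) : Int :=
  let n : Int := source.length
  let m : Int := target.length
  let s : PySem.Set Int := source.foldl (fun acc x => PySem.Set.add acc x) PySem.Set.empty
  if solveCheck s target then
    let dp : List (List Int) :=
      (PySem.List.pyRange 0 n 1).map (fun i =>
        (PySem.List.pyRange 0 m 1).map (fun j =>
          if PySem.List.pyGetD source i 0 == PySem.List.pyGetD target j 0 then (1 : Int) else 0))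
    let l : List Int :=
      (PySem.List.pyRange 0 m 1).foldl (fun l j =>
        match (PySem.List.pyRange 0 n 1).find?
            (fun i => PySem.List.pyGetD (PySem.List.pyGetD dp i []) j 0 == 1) with
        | some i => l ++ [i]
        | none => l) []
    let ans : Int :=
      (PySem.List.pyRange 1 (l.length : Int) 1).foldl (fun ans i =>
        if PySem.List.pyGetD l i 0 > PySem.List.pyGetD l (i - 1) 0 then ans else ans + 1) 0
    ans + 1
  else -1

-- ===== PORT B =====
-- 'for x in target: …' with early return -1 and state (ans, prev)
def solveAltLoop (first : PySem.Dict Int Int) : List Int → Int → Option Int → Int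
  | [], ans, _ => ans
  | x :: xs, ans, prev =>
    match PySem.Dict.get? first x with
    | none => -1
    | some idx =>
      solveAltLoop first xs
        (if (match prev with | some p => decide (idx ≤ p) | none => false) then ans + 1 else ans)
        (some idx)

def solve_alt (source : List Int) (target : List Int) : Int :=
  let first : PySem.Dict Int Int :=
    (PySem.List.enumerate source 0).foldl
      (fun d p => if PySem.Dict.contains d p.2 then d else PySem.Dict.insert d p.2 p.1)
      PySem.Dict.empty
  solveAltLoop first target 1 none

-- ===== PRECONDITION & SPEC =====
def Spec_solve (source : List Int) (target : List Int) (out : Int) : Prop := out = solve_alt source target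
instance (source : List Int) (target : List Int) (out : Int) : Decidable (Spec_solve source target out) := by unfold Spec_solve; infer_instance

-- ===== CLAIM (what is proved, stated in full; the proofs are below) =====
def Claim_equal_solve : Prop := ∀ (source : List Int) (target : List Int), Dom_solve source target → Spec_solve source target (solve source target)

-- ===== LEMMAS AND PROOFS =====


theorem find_range_index (y : Int) (src : List Int) :
    (List.range src.length).find? (fun k => src.getD k 0 == y) = PySem.List.index? src y := by
  induction src with
  | nil => simp [PySem.List.index?]
  | cons z rest ih =>
    rw [List.length_cons, List.range_succ_eq_map, List.find?_cons, List.find?_map]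
    by_cases hz : z = y
    · simp [hz, PySem.List.index?_eq_idxOf?, List.idxOf?_cons]
    · have hb : ((z :: rest).getD 0 0 == y) = false := by simp [hz]
      rw [hb, PySem.List.index?_cons_of_ne (xs := rest) hz]
      simp only [Function.comp_def, List.getD_cons_succ]
      rw [ih]

theorem pyRange_zero_cast (n : Nat) :
    PySem.List.pyRange 0 (n : Int) 1 = (List.range n).map (fun k : Nat => (k : Int)) := by
  rw [PySem.List.pyRange_one]
  norm_num

theorem find?_congr_mem {α : Type} (l : List α) (p q : α → Bool)
    (h : ∀ x ∈ l, p x = q x) : l.find? p = l.find? q := by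
  induction l with
  | nil => rfl
  | cons a t ih =>
    rw [List.find?_cons, List.find?_cons, h a (by simp)]
    cases q a
    · exact ih (fun x hx => h x (by simp [hx]))
    · rfl

def pvH (source : List Int) (y : Int) : Option Int :=
  Option.map (fun n : Nat => (n : Int)) (PySem.List.index? source y)

theorem find_pyRange_index (src : List Int) (y : Int) :
    (PySem.List.pyRange 0 (src.length : Int) 1).find? (fun i => PySem.List.pyGetD src i 0 == y)
      = pvH src y := by
  rw [pyRange_zero_cast, List.find?_map (f := fun k : Nat => (k : Int))]
  simp only [Function.comp_def, PySem.List.pyGetD_natCast]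
  rw [find_range_index, pvH]

-- check loop = all-membership
theorem check_eq_all (s : PySem.Set Int) (t : List Int) :
    solveCheck s t = t.all (fun x => PySem.Set.contains s x) := by
  induction t with
  | nil => rfl
  | cons x xs ih => rw [solveCheck, List.all_cons, ih]; cases PySem.Set.contains s x <;> simp

-- the dict loop: value -> first index
theorem dict_get (src : List Int) : ∀ (k : Int) (d : PySem.Dict Int Int) (y : Int),
    (((PySem.List.enumerate src k).foldl
        (fun d p => if PySem.Dict.contains d p.2 then d else PySem.Dict.insert d p.2 p.1) d)).get? y
      = match d.get? y with
        | some v => some v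
        | none => Option.map (fun n : Nat => k + (n : Int)) (PySem.List.index? src y) := by
  induction src with
  | nil =>
    intro k d y
    simp [PySem.List.enumerate, PySem.List.index?]
    cases d.get? y <;> rfl
  | cons z rest ih =>
    intro k d y
    rw [PySem.List.enumerate_cons, List.foldl_cons, ih]
    by_cases hz : z = y
    · subst hz
      cases hd : d.get? z with
      | some v =>
        have hc : d.contains z = true := by
          rw [PySem.Dict.contains_eq_isSome_get?, hd]; rfl
        simp [hc, hd]
      | none =>
        have hc : d.contains z = false := by
          rw [PySem.Dict.contains_eq_isSome_get?, hd]; rfl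
        simp only [hc]
        rw [PySem.List.index?_cons_self]
        simp
    · have hg : (if d.contains z then d else d.insert z k).get? y = d.get? y := by
        split
        · rfl
        · exact PySem.Dict.get?_insert_of_ne _ _ (Ne.symm hz)
      rw [hg, PySem.List.index?_cons_of_ne (xs := rest) hz]
      cases d.get? y with
      | some v => rfl
      | none =>
        simp only [Option.map_map]
        cases hi : PySem.List.index? rest y with
        | none => rfl
        | some n => simp [Function.comp]; ring

theorem set_fold_contains (source : List Int) (x : Int) :
    PySem.Set.contains (source.foldl (fun acc x => PySem.Set.add acc x) PySem.Set.empty) x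
      = source.contains x := by
  simp [PySem.Set.contains_eq_listContains, PySem.Set.mem_foldl_add (f := fun b => b), PySem.Set.empty]

theorem first_get (source : List Int) (y : Int) :
    ((PySem.List.enumerate source 0).foldl
        (fun d p => if PySem.Dict.contains d p.2 then d else PySem.Dict.insert d p.2 p.1)
        PySem.Dict.empty).get? y = pvH source y := by
  rw [dict_get]
  simp [PySem.Dict.get?_empty, pvH]

def pvBrk : Int → List Int → Int
  | _, [] => 0
  | p, a :: rest => (if a > p then 0 else 1) + pvBrk a rest

theorem pairs_eq_zip (a : Int) (rest : List Int) :
    (List.range rest.length).map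
        (fun k : Nat => ((a :: rest).getD k 0, (a :: rest).getD (k + 1) 0))
      = (a :: rest).zip rest := by
  apply List.ext_getElem
  · simp [List.length_zip]
  · intro i h1 h2
    simp only [List.getElem_map, List.getElem_range, List.getElem_zip]
    have hi : i < rest.length := by simpa using h2
    rw [List.getD_eq_getElem _ _ (by simp; omega), List.getD_eq_getElem _ _ (by simp; omega)]
    simp

theorem zip_brk (rest : List Int) : ∀ (a c : Int),
    ((a :: rest).zip rest).foldl (fun ans p => if p.2 > p.1 then ans else ans + 1) c
      = c + pvBrk a rest := by
  induction rest with
  | nil => intro a c; simp [pvBrk]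
  | cons b rest' ih =>
    intro a c
    rw [List.zip_cons_cons, List.foldl_cons, ih]
    simp only [pvBrk]
    by_cases h : b > a
    · simp [h]
    · simp [h]; ring

theorem count_fold (a : Int) (rest : List Int) :
    (PySem.List.pyRange 1 (((a :: rest).length : Nat) : Int) 1).foldl
        (fun ans i => if PySem.List.pyGetD (a :: rest) i 0 > PySem.List.pyGetD (a :: rest) (i - 1) 0
          then ans else ans + 1) 0
      = pvBrk a rest := by
  rw [PySem.List.pyRange_one]
  have hn : (((((a :: rest).length : Nat) : Int)) - 1).toNat = rest.length := by
    simp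
  rw [hn, List.foldl_map]
  have hb : (fun (ans : Int) (k : Nat) =>
        if PySem.List.pyGetD (a :: rest) (1 + (k : Int)) 0 > PySem.List.pyGetD (a :: rest) (1 + (k : Int) - 1) 0
          then ans else ans + 1)
      = fun (ans : Int) (k : Nat) =>
        (fun (ans : Int) (p : Int × Int) => if p.2 > p.1 then ans else ans + 1) ans
          ((fun k : Nat => ((a :: rest).getD k 0, (a :: rest).getD (k + 1) 0)) k) := by
    funext ans k
    have h1 : (1 : Int) + (k : Int) = ((k + 1 : Nat) : Int) := by push_cast; ring
    rw [h1]
    rw [show ((k + 1 : Nat) : Int) - 1 = ((k : Nat) : Int) by push_cast; ring]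
    rw [PySem.List.pyGetD_natCast, PySem.List.pyGetD_natCast]
  rw [hb, ← List.foldl_map (f := fun k : Nat => ((a :: rest).getD k 0, (a :: rest).getD (k + 1) 0))
    (g := fun (ans : Int) (p : Int × Int) => if p.2 > p.1 then ans else ans + 1),
    pairs_eq_zip, zip_brk]
  ring

theorem flatMap_toList_eq_map (t : List Int) (f : Int → Option Int) (g : Int → Int)
    (h : ∀ y ∈ t, f y = some (g y)) :
    t.flatMap (fun y => (f y).toList) = t.map g := by
  induction t with
  | nil => rfl
  | cons y t' ih =>
    rw [List.flatMap_cons, List.map_cons, h y (by simp),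
      ih (fun x hx => h x (by simp [hx]))]
    rfl

theorem altLoop_missing (first : PySem.Dict Int Int) :
    ∀ (t : List Int), (∃ y ∈ t, first.get? y = none) →
      ∀ (ans : Int) (prev : Option Int), solveAltLoop first t ans prev = -1 := by
  intro t
  induction t with
  | nil => rintro ⟨y, hy, _⟩; simp at hy
  | cons x xs ih =>
    rintro ⟨y, hy, hn⟩ ans prev
    rw [solveAltLoop]
    cases hx : first.get? x with
    | none => rfl
    | some idx =>
      apply ih
      rcases List.mem_cons.mp hy with h | h
      · subst h; rw [hx] at hn; exact absurd hn (by simp)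
      · exact ⟨y, h, hn⟩

theorem altLoop_found (first : PySem.Dict Int Int) (F : Int → Int) :
    ∀ (t : List Int), (∀ y ∈ t, first.get? y = some (F y)) →
      ∀ (ans p : Int), solveAltLoop first t ans (some p) = ans + pvBrk p (t.map F) := by
  intro t
  induction t with
  | nil => intro _ ans p; simp [solveAltLoop, pvBrk]
  | cons x xs ih =>
    intro h ans p
    rw [solveAltLoop, h x (by simp)]
    dsimp only
    rw [ih (fun y hy => h y (List.mem_cons_of_mem x hy))]
    simp only [List.map_cons, pvBrk]
    by_cases hc : F x > p
    · have : ¬ (F x ≤ p) := by omega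
      simp [this, hc]
    · have : F x ≤ p := by omega
      simp [this, hc]
      ring

theorem l_eq (source target : List Int) :
    ((PySem.List.pyRange 0 (target.length : Int) 1).foldl (fun l j =>
        match (PySem.List.pyRange 0 (source.length : Int) 1).find?
            (fun i => PySem.List.pyGetD (PySem.List.pyGetD
               ((PySem.List.pyRange 0 (source.length : Int) 1).map (fun i =>
                  (PySem.List.pyRange 0 (target.length : Int) 1).map (fun j =>
                    if PySem.List.pyGetD source i 0 == PySem.List.pyGetD target j 0
                      then (1 : Int) else 0))) i []) j 0 == 1) with
        | some i => l ++ [i]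
        | none => l) [])
      = target.flatMap (fun y => (pvH source y).toList) := by
  rw [PySem.List.foldl_congr_mem _ _
      (fun (l : List Int) (j : Int) => l ++ (pvH source (PySem.List.pyGetD target j 0)).toList) _ ?_]
  · rw [PySem.List.foldl_pyRange_zero_pyGetD' target 0
      (fun (l : List Int) (y : Int) => l ++ (pvH source y).toList) []]
    rw [PySem.List.foldl_append_eq_flatMap]
    rfl
  · intro acc j hj
    have hj' : 0 ≤ j ∧ j < (target.length : Int) := PySem.List.mem_pyRange_one.mp hj
    have hfind : (PySem.List.pyRange 0 (source.length : Int) 1).find?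
        (fun i => PySem.List.pyGetD (PySem.List.pyGetD
           ((PySem.List.pyRange 0 (source.length : Int) 1).map (fun i =>
              (PySem.List.pyRange 0 (target.length : Int) 1).map (fun j =>
                if PySem.List.pyGetD source i 0 == PySem.List.pyGetD target j 0
                  then (1 : Int) else 0))) i []) j 0 == 1)
        = pvH source (PySem.List.pyGetD target j 0) := by
      rw [find?_congr_mem _ _ (fun i => PySem.List.pyGetD source i 0 == PySem.List.pyGetD target j 0) ?_]
      · exact find_pyRange_index source (PySem.List.pyGetD target j 0)
      · intro i hi
        have hi' : 0 ≤ i ∧ i < (source.length : Int) := PySem.List.mem_pyRange_one.mp hi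
        have hdp : PySem.List.pyGetD
            ((PySem.List.pyRange 0 (source.length : Int) 1).map (fun i =>
              (PySem.List.pyRange 0 (target.length : Int) 1).map (fun j =>
                if PySem.List.pyGetD source i 0 == PySem.List.pyGetD target j 0
                  then (1 : Int) else 0))) i []
            = (PySem.List.pyRange 0 (target.length : Int) 1).map (fun j =>
                if PySem.List.pyGetD source i 0 == PySem.List.pyGetD target j 0
                  then (1 : Int) else 0) := by
          rw [PySem.List.pyGetD_eq_getElem _ _ hi'.1 (by simp [PySem.List.length_pyRange_one]; omega)]
          rw [List.getElem_map]
          rw [show (PySem.List.pyRange 0 (source.length : Int) 1)[i.toNat]'(by simp [PySem.List.length_pyRange_one]; omega) = i from by rw [PySem.List.getElem_pyRange_one]; omega]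
        rw [hdp]
        rw [PySem.List.pyGetD_eq_getElem _ _ hj'.1 (by simp [PySem.List.length_pyRange_one]; omega)]
        rw [List.getElem_map]
        rw [show (PySem.List.pyRange 0 (target.length : Int) 1)[j.toNat]'(by simp [PySem.List.length_pyRange_one]; omega) = j from by rw [PySem.List.getElem_pyRange_one]; omega]
        by_cases hc : PySem.List.pyGetD source i 0 == PySem.List.pyGetD target j 0 <;> simp [hc]
    rw [hfind]
    dsimp only
    cases pvH source (PySem.List.pyGetD target j 0) <;> simp

theorem solve_main : ∀ (source target : List Int), solve source target = solve_alt source target := by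
  intro source target
  simp only [solve, solve_alt]
  by_cases hall : ∀ y ∈ target, y ∈ source
  · have hsome : ∀ y ∈ target, pvH source y = some ((pvH source y).getD 0) := by
      intro y hy
      have : (PySem.List.index? source y).isSome :=
        (PySem.List.index?_isSome_iff source y).mpr (hall y hy)
      rcases Option.isSome_iff_exists.mp this with ⟨n, hn⟩
      rw [pvH, hn]
      rfl
    have hchk : solveCheck (source.foldl (fun acc x => PySem.Set.add acc x) PySem.Set.empty) target = true := by
      rw [check_eq_all]
      simp only [List.all_eq_true]
      intro x hx
      rw [set_fold_contains]
      simpa using hall x hx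
    rw [if_pos hchk, l_eq,
      flatMap_toList_eq_map target (fun y => pvH source y) (fun y => (pvH source y).getD 0) hsome]
    have hget : ∀ y ∈ target,
        ((PySem.List.enumerate source 0).foldl
          (fun d p => if PySem.Dict.contains d p.2 then d else PySem.Dict.insert d p.2 p.1)
          PySem.Dict.empty).get? y = some ((pvH source y).getD 0) := by
      intro y hy
      rw [first_get]
      exact hsome y hy
    cases target with
    | nil =>
      rw [solveAltLoop]
      simp [PySem.List.pyRange_one_eq_nil]
    | cons y t =>
      rw [List.map_cons, count_fold ((pvH source y).getD 0) (t.map (fun y => (pvH source y).getD 0))]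
      rw [solveAltLoop, hget y (by simp)]
      dsimp only
      rw [if_neg (by simp)]
      rw [altLoop_found _ (fun y => (pvH source y).getD 0) t
        (fun z hz => hget z (List.mem_cons_of_mem y hz)) 1 ((pvH source y).getD 0)]
      ring
  · obtain ⟨y, hy, hny⟩ : ∃ y ∈ target, y ∉ source := by
      by_contra hc
      exact hall (fun y hy => by by_contra hn; exact hc ⟨y, hy, hn⟩)
    have hchk : solveCheck (source.foldl (fun acc x => PySem.Set.add acc x) PySem.Set.empty) target = false := by
      rw [check_eq_all]
      simp only [List.all_eq_false]
      refine ⟨y, hy, ?_⟩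
      rw [set_fold_contains]
      simpa using hny
    rw [if_neg (fun h => by rw [h] at hchk; cases hchk)]
    have h0 : PySem.List.index? source y = none := (PySem.List.index?_eq_none_iff source y).mpr hny
    rw [altLoop_missing _ target ⟨y, hy, by rw [first_get, pvH, h0]; rfl⟩]


-- ===== VERDICT (by name: the statement is the Claim_ definition above) =====
theorem solve_spec : Claim_equal_solve := by
  intro source target _
  unfold Spec_solve
  exact solve_main source target
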